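-- pv_equiv track=rewrite | github.com/bigdatalyn/bigdatalyn.github.io | files/Oracle/ora_awr_miner/awr_miner_plot_21.py | parseForFigure7
-- ===== SOURCE A (Python) =====
-- def parseForFigure7(s):
--     f=s['variable'].split(' ')
--
--     event_name = ''
--     for c in range(len(f) -1):
--         event_name += f[c] + ' '
--     event_name=event_name.strip()
--
--     wait_time_milli = f[len(f) -1]
--
--     return event_name, wait_time_milli
-- ===== SOURCE B (Python) =====
-- def parseForFigure7(s):
--     v = s['variable']
--     pre = ''
--     cur = ''
--     for ch in v:
--         if ch == ' ':
--             pre += cur + ' '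
--             cur = ''
--         else:
--             cur += ch
--     return pre.strip(), cur
-- ===== Notes on version B (the rewrite author's own statement) =====
-- stated objective: alternative
-- what changed: B replaces A's split-into-token-list plus index-loop rebuild with a single character-level state-machine pass that keeps (finished prefix, current token), so no token list is ever built.
import Mathlib
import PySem

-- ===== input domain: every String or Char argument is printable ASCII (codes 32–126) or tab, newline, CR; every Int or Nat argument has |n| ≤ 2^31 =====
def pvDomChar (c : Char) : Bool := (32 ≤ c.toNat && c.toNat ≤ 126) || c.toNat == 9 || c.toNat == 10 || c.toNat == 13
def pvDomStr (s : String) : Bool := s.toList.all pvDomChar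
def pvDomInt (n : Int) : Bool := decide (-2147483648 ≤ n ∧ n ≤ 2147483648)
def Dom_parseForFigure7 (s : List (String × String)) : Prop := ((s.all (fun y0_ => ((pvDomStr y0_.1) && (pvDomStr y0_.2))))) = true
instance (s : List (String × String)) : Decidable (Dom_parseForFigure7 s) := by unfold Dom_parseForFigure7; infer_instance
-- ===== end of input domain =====

-- B replaces A's split-into-token-list + index-loop rebuild by a single character-level
-- state-machine pass keeping (finished prefix, current token); objective: alternative.

-- ===== PORT A =====
def parseForFigure7 (s : List (String × String)) : String × String :=
  let v := ((PySem.Dict.mk s).get? "variable").getD ""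
  let f := (PySem.Str.split? v " ").getD []
  let name0 := (PySem.List.pyRange 0 ((f.length : Int) - 1) 1).foldl
      (fun acc c => acc ++ (PySem.List.pyGet? f c).getD "" ++ " ") ""
  let event_name := PySem.Str.strip name0
  let wait_time_milli := (PySem.List.pyGet? f ((f.length : Int) - 1)).getD ""
  (event_name, wait_time_milli)

-- ===== PORT B =====
def parseForFigure7_alt (s : List (String × String)) : String × String :=
  let v := ((PySem.Dict.mk s).get? "variable").getD ""
  let st := v.toList.foldl
      (fun (pc : String × String) ch =>
        if ch = ' ' then (pc.1 ++ pc.2 ++ " ", "") else (pc.1, pc.2.push ch))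
      ("", "")
  (PySem.Str.strip st.1, st.2)

-- ===== PRECONDITION & SPEC =====
-- Pre_ excludes exactly the inputs on which Python A raises KeyError: a dict with no 'variable' key.
def Pre_parseForFigure7 (s : List (String × String)) : Prop := "variable" ∈ s.map Prod.fst
instance (s : List (String × String)) : Decidable (Pre_parseForFigure7 s) := by unfold Pre_parseForFigure7; infer_instance
def pvWitness_parseForFigure7 : (List (String × String)) := [("variable", "db file sequential read 12.5")]

def Spec_parseForFigure7 (s : List (String × String)) (out : String × String) : Prop := out = parseForFigure7_alt s
instance (s : List (String × String)) (out : String × String) : Decidable (Spec_parseForFigure7 s out) := by unfold Spec_parseForFigure7; infer_instance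

-- ===== CLAIM (what is proved, stated in full; the proofs are below) =====
def Claim_equal_parseForFigure7 : Prop := ∀ (s : List (String × String)), Dom_parseForFigure7 s → Pre_parseForFigure7 s → Spec_parseForFigure7 s (parseForFigure7 s)

-- ===== LEMMAS AND PROOFS =====

/-- Specification of Python's `v.split(' ')` as a structural recursion. -/
def mySplit : List Char → List (List Char)
  | [] => [[]]
  | c :: r =>
    if c = ' ' then [] :: mySplit r
    else
      match mySplit r with
      | [] => [[c]]
      | h :: t => (c :: h) :: t

theorem mySplit_ne_nil (l : List Char) : mySplit l ≠ [] := by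
  cases l with
  | nil => simp [mySplit]
  | cons c r =>
    simp only [mySplit]
    split
    · simp
    · rcases h : mySplit r with _ | ⟨h0, t⟩ <;> simp

theorem modifyHead_nil_append (X : List (List Char)) :
    X.modifyHead (([] : List Char) ++ ·) = X := by
  cases X <;> simp

theorem modifyHead_id (X : List (List Char)) : X.modifyHead (fun x => x) = X := by
  cases X <;> simp

theorem go_spec (fuel : Nat) : ∀ (l cur : List Char) (acc : List (List Char)), l.length ≤ fuel →
    PySem.Chars.splitOn.go [' '] fuel l cur acc
      = acc.reverse ++ (mySplit l).modifyHead (cur.reverse ++ ·) := by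
  induction fuel with
  | zero =>
    intro l cur acc h
    have hl : l = [] := by
      cases l with
      | nil => rfl
      | cons c r => simp at h
    subst hl
    simp [PySem.Chars.splitOn.go, mySplit]
  | succ fuel ih =>
    intro l cur acc h
    cases l with
    | nil => simp [PySem.Chars.splitOn.go, mySplit]
    | cons c r =>
      by_cases hc : c = ' '
      · subst hc
        rw [show PySem.Chars.splitOn.go [' '] (fuel + 1) (' ' :: r) cur acc
              = PySem.Chars.splitOn.go [' '] fuel r [] (cur.reverse :: acc) by
            simp [PySem.Chars.splitOn.go, List.isPrefixOf]]
        rw [ih r [] (cur.reverse :: acc) (by simpa using Nat.lt_succ_iff.mp (by simpa using h))]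
        simp [mySplit, modifyHead_id]
      · rw [show PySem.Chars.splitOn.go [' '] (fuel + 1) (c :: r) cur acc
              = PySem.Chars.splitOn.go [' '] fuel r (c :: cur) acc by
            simp only [PySem.Chars.splitOn.go, List.isPrefixOf]
            simp
            exact fun h => absurd h.symm hc]
        rw [ih r (c :: cur) acc (by simpa using Nat.lt_succ_iff.mp (by simpa using h))]
        rcases hr : mySplit r with _ | ⟨h0, t⟩
        · exact absurd hr (mySplit_ne_nil r)
        · simp [mySplit, hc, hr]

theorem splitOn_eq_mySplit (l : List Char) :
    PySem.Chars.splitOn l [' '] = mySplit l := by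
  unfold PySem.Chars.splitOn
  rw [go_spec (l.length + 1) l [] [] (by omega)]
  simp [modifyHead_id]

/-- concat of tokens each followed by one space. -/
def joinSp (ts : List (List Char)) : List Char := (ts.map (· ++ [' '])).flatten

theorem stringFold_join (ts : List (List Char)) : ∀ (init : String),
    (ts.map String.ofList).foldl (fun a t => a ++ t ++ " ") init
      = init ++ String.ofList (joinSp ts) := by
  induction ts with
  | nil => intro init; apply String.ext; simp [joinSp]
  | cons h t ih =>
    intro init
    simp only [List.map_cons, List.foldl_cons, ih]
    apply String.ext
    simp [joinSp]

/-- The char-level version of B's loop body. -/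
def foldBChars (L : List Char) (p : List Char × List Char) : List Char × List Char :=
  L.foldl
    (fun pc ch => if ch = ' ' then (pc.1 ++ pc.2 ++ [' '], []) else (pc.1, pc.2 ++ [ch])) p

theorem foldB_bridge (L : List Char) : ∀ (pre cur : String),
    L.foldl
      (fun (pc : String × String) ch =>
        if ch = ' ' then (pc.1 ++ pc.2 ++ " ", "") else (pc.1, pc.2.push ch))
      (pre, cur)
      = (String.ofList (foldBChars L (pre.toList, cur.toList)).1,
         String.ofList (foldBChars L (pre.toList, cur.toList)).2) := by
  induction L with
  | nil => intro pre cur; simp [foldBChars]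
  | cons ch r ih =>
    intro pre cur
    by_cases hc : ch = ' '
    · subst hc
      simp only [List.foldl_cons, ih]
      simp [foldBChars]
    · simp only [List.foldl_cons, if_neg hc, ih]
      simp [foldBChars, hc]

theorem foldB_spec (L : List Char) : ∀ (pre cur : List Char),
    foldBChars L (pre, cur)
      = (pre ++ joinSp ((mySplit L).modifyHead (cur ++ ·)).dropLast,
         ((mySplit L).modifyHead (cur ++ ·)).getLastD []) := by
  induction L with
  | nil => intro pre cur; simp [foldBChars, mySplit, joinSp]
  | cons c r ih =>
    intro pre cur
    by_cases hc : c = ' '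
    · subst hc
      have step : foldBChars (' ' :: r) (pre, cur) = foldBChars r (pre ++ cur ++ [' '], []) := by
        simp [foldBChars]
      rw [step, ih]
      rcases hr : mySplit r with _ | ⟨h0, t⟩
      · exact absurd hr (mySplit_ne_nil r)
      · simp [mySplit, hr, joinSp]
    · have step : foldBChars (c :: r) (pre, cur) = foldBChars r (pre, cur ++ [c]) := by
        simp [foldBChars, hc]
      rw [step, ih]
      rcases hr : mySplit r with _ | ⟨h0, t⟩
      · exact absurd hr (mySplit_ne_nil r)
      · simp [mySplit, hc, hr]

theorem split_eq_map (v : String) :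
    (PySem.Str.split? v " ").getD [] = (mySplit v.toList).map String.ofList := by
  have h := PySem.Str.split?_map v " "
  rw [show (" " : String).toList = [' '] from rfl] at h
  unfold PySem.Chars.split? at h
  rw [splitOn_eq_mySplit] at h
  simp only [List.isEmpty_cons, Bool.false_eq_true, if_false] at h
  rcases hx : PySem.Str.split? v " " with _ | xs
  · rw [hx] at h; simp at h
  · rw [hx] at h
    simp only [Option.map_some, Option.some.injEq] at h
    simp only [Option.getD_some]
    rw [← h, List.map_map]
    rw [show String.ofList ∘ String.toList = id from funext fun x => String.ofList_toList,
        List.map_id]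

theorem A_loop (f : List String) :
    (PySem.List.pyRange 0 ((f.length : Int) - 1) 1).foldl
        (fun acc c => acc ++ (PySem.List.pyGet? f c).getD "" ++ " ") ""
      = f.dropLast.foldl (fun a t => a ++ t ++ " ") "" := by
  cases f with
  | nil => simp [PySem.List.pyRange_one_eq_nil]
  | cons x xs =>
    rw [show ((x :: xs).length : Int) - 1 = (((x :: xs).dropLast.length : Nat) : Int) by simp]
    rw [← PySem.List.foldl_pyRange_zero_pyGetD' ((x :: xs).dropLast) "" (fun a t => a ++ t ++ " ") ""]
    apply PySem.List.foldl_congr_mem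
    intro acc j hj
    rw [PySem.List.mem_pyRange_one] at hj
    have h2 : j.toNat < (x :: xs).dropLast.length := by omega
    have h2' : j.toNat < (x :: xs).length := by
      simp only [List.length_dropLast] at h2; omega
    rw [show j = ((j.toNat : Nat) : Int) by omega]
    rw [PySem.List.pyGet?_natCast, PySem.List.pyGetD_natCast]
    rw [List.getElem?_eq_getElem h2', List.getD_eq_getElem _ _ h2, List.getElem_dropLast]
    rfl

theorem A_last (f : List String) :
    (PySem.List.pyGet? f ((f.length : Int) - 1)).getD "" = f.getLastD "" := by
  cases f with
  | nil => simp [PySem.List.pyGet?]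
  | cons x xs =>
    rw [show ((x :: xs).length : Int) - 1 = (((x :: xs).length - 1 : Nat) : Int) by simp]
    rw [PySem.List.pyGet?_natCast]
    have hlt : (x :: xs).length - 1 < (x :: xs).length := by simp
    rw [List.getElem?_eq_getElem hlt]
    rw [List.getLastD_eq_getLast?, List.getLast?_eq_getElem?, List.getElem?_eq_getElem hlt]

theorem map_getLastD (ts : List (List Char)) :
    (ts.map String.ofList).getLastD "" = String.ofList (ts.getLastD []) := by
  induction ts with
  | nil => rfl
  | cons h t ih =>
    cases t with
    | nil => rfl
    | cons a b => simpa using ih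

-- ===== VERDICT (by name: the statement is the Claim_ definition above) =====
theorem parseForFigure7_spec : Claim_equal_parseForFigure7 := by
  intro s _ _
  unfold Spec_parseForFigure7 parseForFigure7 parseForFigure7_alt
  set v := ((PySem.Dict.mk s).get? "variable").getD "" with hv
  simp only []
  rw [A_loop, A_last, split_eq_map]
  rw [foldB_bridge]
  have hempty : ("" : String).toList = [] := rfl
  rw [hempty, foldB_spec, modifyHead_nil_append]
  rw [← List.map_dropLast, stringFold_join, map_getLastD]
  congr 1
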